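-- pv_equiv track=rewrite | github.com/Luksuz/truck-pallet-scheduler | sleper.py | assign_remaining_containers
-- ===== SOURCE A (Python) =====
-- import itertools
-- from typing import List, Tuple
--
-- def assign_remaining_containers(remaining_containers: List[int], container_lengths: List[int], column_heights: List[int], max_length: int, num_columns: int) -> Tuple[List[Tuple[int, int]], List[int]]:
--     """
--     Assign remaining unpaired containers to columns using a brute-force approach to find the optimal assignment.
--     """
--     if not remaining_containers:
--         return [], column_heights.copy()
--
--     optimal_max_height = float('inf')
--     optimal_assignment = None
--
--     # Generate all possible assignments for remaining containers
--     for assignment in itertools.product(range(num_columns), repeat=len(remaining_containers)):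
--         temp_heights = column_heights.copy()
--         valid = True
--
--         for idx, col in zip(remaining_containers, assignment):
--             temp_heights[col] += container_lengths[idx]
--             if temp_heights[col] > max_length:
--                 valid = False
--                 break
--
--         if valid:
--             current_max = max(temp_heights)
--             if current_max < optimal_max_height:
--                 optimal_max_height = current_max
--                 optimal_assignment = assignment
--
--     if optimal_assignment is not None:
--         final_assignments = []
--         for idx, col in zip(remaining_containers, optimal_assignment):
--             final_assignments.append((idx, col))
--             column_heights[col] += container_lengths[idx]
--         return final_assignments, column_heights
--     else:
--         raise ValueError("No valid assignment found for remaining containers without exceeding column heights.")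
-- ===== SOURCE B (Python) =====
-- from typing import List, Tuple
--
-- def assign_remaining_containers(remaining_containers: List[int], container_lengths: List[int], column_heights: List[int], max_length: int, num_columns: int) -> Tuple[List[Tuple[int, int]], List[int]]:
--     """
--     Assign remaining unpaired containers to columns via recursive backtracking
--     (DFS over columns in ascending order, pruning any branch whose touched
--     column already exceeds max_length); keeps the first strict optimum, which
--     is exactly the lexicographically-first optimal assignment.
--     """
--     if not remaining_containers:
--         return [], column_heights.copy()
--
--     best = None  # (max_height, assignment)
--     heights = column_heights.copy()
--     n = len(remaining_containers)
--
--     def dfs(pos, acc):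
--         nonlocal best
--         if pos == n:
--             m = max(heights)
--             if best is None or m < best[0]:
--                 best = (m, acc.copy())
--             return
--         length = container_lengths[remaining_containers[pos]]
--         for col in range(num_columns):
--             heights[col] += length
--             if heights[col] <= max_length:
--                 acc.append(col)
--                 dfs(pos + 1, acc)
--                 acc.pop()
--             heights[col] -= length
--
--     dfs(0, [])
--
--     if best is None:
--         raise ValueError("No valid assignment found for remaining containers without exceeding column heights.")
--
--     final_assignments = list(zip(remaining_containers, best[1]))
--     for idx, col in final_assignments:
--         column_heights[col] += container_lengths[idx]
--     return final_assignments, column_heights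
-- ===== Notes on version B (the rewrite author's own statement) =====
-- stated objective: alternative
-- what changed: Replaced the flat itertools.product enumeration of all num_columns^k assignments with a recursive DFS/backtracking search that assigns containers one at a time in ascending column order, carrying running column heights and pruning any branch whose touched column exceeds max_length, keeping the first strict optimum so the lexicographically-first optimal assignment (and the in-place mutation of column_heights) is preserved exactly.
import Mathlib
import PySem

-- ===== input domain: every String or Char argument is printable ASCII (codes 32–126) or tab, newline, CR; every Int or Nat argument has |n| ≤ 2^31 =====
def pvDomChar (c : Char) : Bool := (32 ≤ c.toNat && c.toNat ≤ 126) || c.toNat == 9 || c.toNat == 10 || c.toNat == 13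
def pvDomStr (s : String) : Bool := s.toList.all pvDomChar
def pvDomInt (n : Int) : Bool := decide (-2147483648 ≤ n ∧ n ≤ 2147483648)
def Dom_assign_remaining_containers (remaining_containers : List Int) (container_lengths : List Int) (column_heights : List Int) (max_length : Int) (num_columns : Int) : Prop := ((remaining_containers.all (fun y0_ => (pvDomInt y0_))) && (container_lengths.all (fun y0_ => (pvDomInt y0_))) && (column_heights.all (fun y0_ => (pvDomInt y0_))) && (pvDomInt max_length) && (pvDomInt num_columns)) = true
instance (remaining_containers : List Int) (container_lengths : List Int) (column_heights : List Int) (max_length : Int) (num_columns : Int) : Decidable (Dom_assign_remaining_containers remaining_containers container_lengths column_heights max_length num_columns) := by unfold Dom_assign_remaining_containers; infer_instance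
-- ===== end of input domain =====

-- ===== PORT A =====
-- Port of A (Python): brute force over itertools.product(range(num_columns), repeat=k).
-- One honest line: B replaces the flat product enumeration by recursive DFS/backtracking with pruning
-- (objective: alternative).  Python A/B mutate column_heights in the success branch; both mutate it
-- identically, and the equivalence proved here is about the returned pair (which contains the final heights).

-- all assignments (tuples of columns) in itertools.product order (first coordinate slowest)
def prodColsA (n : Nat) : (k : Nat) → List (List Int)
  | 0 => [[]]
  | k+1 => (List.range n).flatMap (fun c => (prodColsA n k).map (fun a => (Int.ofNat c) :: a))

-- the inner validity loop of A: add each container to its column, break (none) on first overflow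
def simT (L : List Int) (M : Int) : List (Int × Int) → List Int → Option (List Int)
  | [], h => some h
  | (i, c) :: rest, h =>
    let h' := h.set c.toNat (h.getD c.toNat 0 + PySem.List.pyGetD L i 0)
    if M < h'.getD c.toNat 0 then none else simT L M rest h'

-- one iteration of A's outer loop: state = (optimal_max_height?, optimal_assignment?)
def stepA (rem L h0 : List Int) (M : Int) (st : Option Int × Option (List Int)) (a : List Int) :
    Option Int × Option (List Int) :=
  match simT L M (rem.zip a) h0 with
  | none => st
  | some th =>
    let m := (PySem.List.max? th (fun x => x)).getD 0
    match st.1 with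
    | none => (some m, some a)
    | some b => if m < b then (some m, some a) else st

-- A's final loop: build final_assignments and apply the heights in order (shared with B, whose
-- Python has the identical final loop)
def finApply (L : List Int) : List (Int × Int) → List Int → List (Int × Int) × List Int
  | [], h => ([], h)
  | (i, c) :: rest, h =>
    let h' := h.set c.toNat (h.getD c.toNat 0 + PySem.List.pyGetD L i 0)
    let r := finApply L rest h'
    ((i, c) :: r.1, r.2)

def assign_remaining_containers (remaining_containers : List Int) (container_lengths : List Int) (column_heights : List Int) (max_length : Int) (num_columns : Int) : (List (Int × Int)) × List Int :=
  if remaining_containers.isEmpty then ([], column_heights)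
  else
    let st := (prodColsA num_columns.toNat remaining_containers.length).foldl
      (stepA remaining_containers container_lengths column_heights max_length) (none, none)
    match st.2 with
    | some a => finApply container_lengths (remaining_containers.zip a) column_heights
    | none => ([], [])   -- Python raises ValueError here (excluded by Pre_)

-- ===== PORT B =====
-- DFS/backtracking: assign containers one at a time, columns in ascending order, pruning a branch
-- as soon as the touched column exceeds max_length; best = first strict optimum found.
def dfsB (L : List Int) (M : Int) (n : Nat) (pending h acc : List Int)
    (best : Option (Int × List Int)) : Option (Int × List Int) :=
  match pending with
  | [] =>
    let m := (PySem.List.max? h (fun x => x)).getD 0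
    match best with
    | none => some (m, acc)
    | some p => if m < p.1 then some (m, acc) else some p
  | i :: rest =>
    (List.range n).foldl
      (fun b c =>
        let h' := h.set c (h.getD c 0 + PySem.List.pyGetD L i 0)
        if h'.getD c 0 ≤ M then dfsB L M n rest h' (acc ++ [(c : Int)]) b else b)
      best
termination_by pending.length
decreasing_by simp

def assign_remaining_containers_alt (remaining_containers : List Int) (container_lengths : List Int) (column_heights : List Int) (max_length : Int) (num_columns : Int) : (List (Int × Int)) × List Int :=
  if remaining_containers.isEmpty then ([], column_heights)
  else
    match dfsB container_lengths max_length num_columns.toNat remaining_containers column_heights [] none with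
    | some p => finApply container_lengths (remaining_containers.zip p.2) column_heights
    | none => ([], [])   -- Python raises ValueError here (excluded by Pre_)

-- ===== PRECONDITION & SPEC =====
-- Pre_ = exactly the inputs on which Python A returns: either no remaining containers, or
-- (no IndexError) every container index is a valid Python index of container_lengths and every
-- column index range(num_columns) stays inside column_heights, and (no ValueError) some assignment
-- f of containers to columns keeps every touched column within max_length at each prefix step.
def Pre_assign_remaining_containers (remaining_containers : List Int) (container_lengths : List Int) (column_heights : List Int) (max_length : Int) (num_columns : Int) : Prop :=
  remaining_containers = [] ∨
  (num_columns ≤ (column_heights.length : Int) ∧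
   (∀ i ∈ remaining_containers, -(container_lengths.length : Int) ≤ i ∧ i < (container_lengths.length : Int)) ∧
   ∃ f : Fin remaining_containers.length → Fin num_columns.toNat,
     ∀ t : Fin remaining_containers.length,
       column_heights.getD (f t).1 0 +
         ((Finset.univ.filter (fun s => s ≤ t ∧ f s = f t)).sum
           (fun s => PySem.List.pyGetD container_lengths (remaining_containers.get s) 0)) ≤ max_length)
instance (remaining_containers : List Int) (container_lengths : List Int) (column_heights : List Int) (max_length : Int) (num_columns : Int) : Decidable (Pre_assign_remaining_containers remaining_containers container_lengths column_heights max_length num_columns) := by unfold Pre_assign_remaining_containers; infer_instance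

def pvWitness_assign_remaining_containers : List Int × List Int × List Int × Int × Int :=
  ([0], [2], [0, 0], 5, 2)

def Spec_assign_remaining_containers (remaining_containers : List Int) (container_lengths : List Int) (column_heights : List Int) (max_length : Int) (num_columns : Int) (out : (List (Int × Int)) × List Int) : Prop := out = assign_remaining_containers_alt remaining_containers container_lengths column_heights max_length num_columns
instance (remaining_containers : List Int) (container_lengths : List Int) (column_heights : List Int) (max_length : Int) (num_columns : Int) (out : (List (Int × Int)) × List Int) : Decidable (Spec_assign_remaining_containers remaining_containers container_lengths column_heights max_length num_columns out) := by unfold Spec_assign_remaining_containers; infer_instance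

-- ===== CLAIM (what is proved, stated in full; the proofs are below) =====
def Claim_equal_assign_remaining_containers : Prop := ∀ (remaining_containers : List Int) (container_lengths : List Int) (column_heights : List Int) (max_length : Int) (num_columns : Int), Dom_assign_remaining_containers remaining_containers container_lengths column_heights max_length num_columns → Pre_assign_remaining_containers remaining_containers container_lengths column_heights max_length num_columns → Spec_assign_remaining_containers remaining_containers container_lengths column_heights max_length num_columns (assign_remaining_containers remaining_containers container_lengths column_heights max_length num_columns)

-- ===== LEMMAS AND PROOFS =====

-- the "update the best record" step shared by both searches
def updP (m : Int) (a : List Int) (b : Option (Int × List Int)) : Option (Int × List Int) :=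
  match b with
  | none => some (m, a)
  | some p => if m < p.1 then some (m, a) else some p

-- A's per-assignment step, rephrased relative to intermediate heights h and an assignment prefix acc
def FF (L : List Int) (M : Int) (rem h acc : List Int)
    (b : Option (Int × List Int)) (a : List Int) : Option (Int × List Int) :=
  match simT L M (rem.zip a) h with
  | none => b
  | some th => updP ((PySem.List.max? th (fun x => x)).getD 0) (acc ++ a) b

theorem foldl_flatMap' {α β γ : Type} (l : List α) (g : α → List β) (f : γ → β → γ) (b : γ) :
    (l.flatMap g).foldl f b = l.foldl (fun b x => (g x).foldl f b) b := by
  induction l generalizing b with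
  | nil => rfl
  | cons x xs ih => simp [List.flatMap_cons, List.foldl_append, ih]

-- the DFS with running heights h and assignment prefix acc equals A's flat fold over all tuples
theorem dfsB_eq_foldl (L : List Int) (M : Int) (n : Nat) :
    ∀ (rem h acc : List Int) (b : Option (Int × List Int)),
      dfsB L M n rem h acc b = (prodColsA n rem.length).foldl (FF L M rem h acc) b := by
  intro rem
  induction rem with
  | nil =>
    intro h acc b
    cases b <;> simp [dfsB, prodColsA, FF, simT, updP]
  | cons i rest ih =>
    intro h acc b
    rw [dfsB]
    simp only [List.length_cons, prodColsA]
    rw [foldl_flatMap']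
    apply PySem.List.foldl_congr_mem
    intro b c _
    rw [List.foldl_map]
    by_cases hc : M < (h.set c (h.getD c 0 + PySem.List.pyGetD L i 0)).getD c 0
    · -- pruned branch: every extension is invalid, the inner fold is the identity
      rw [if_neg (by omega)]
      have : ∀ b' (a : List Int), FF L M (i :: rest) h acc b' ((Int.ofNat c) :: a) = b' := by
        intro b' a
        simp only [FF, Int.ofNat_eq_natCast, List.zip_cons_cons, simT, Int.toNat_natCast]
        rw [if_pos hc]
      symm
      calc (prodColsA n rest.length).foldl
            (fun b a => FF L M (i :: rest) h acc b ((Int.ofNat c) :: a)) b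
          = (prodColsA n rest.length).foldl (fun b _ => b) b := by
            apply PySem.List.foldl_congr_mem; intro b' a _; exact this b' a
        _ = b := PySem.List.foldl_ignore _ b
    · rw [if_pos (by omega), ih]
      apply PySem.List.foldl_congr_mem
      intro b' a _
      simp only [FF, Int.ofNat_eq_natCast, List.zip_cons_cons, simT, Int.toNat_natCast]
      rw [if_neg hc]
      simp [List.append_assoc]

def toPair (s : Option (Int × List Int)) : Option Int × Option (List Int) :=
  (s.map Prod.fst, s.map Prod.snd)

-- A's two optimal_* variables track exactly B's single best record
theorem stepA_toPair (rem L h : List Int) (M : Int) (s : Option (Int × List Int)) (a : List Int) :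
    stepA rem L h M (toPair s) a = toPair (FF L M rem h [] s a) := by
  cases hs : simT L M (rem.zip a) h with
  | none => cases s <;> simp [stepA, FF, hs, toPair]
  | some th =>
    cases s with
    | none => simp [stepA, FF, hs, toPair, updP]
    | some p =>
      simp only [stepA, FF, hs, toPair, updP, Option.map_some, List.nil_append]
      by_cases hm : (PySem.List.max? th (fun x => x)).getD 0 < p.1 <;> simp [hm]

theorem foldl_toPair (rem L h : List Int) (M : Int) :
    ∀ (l : List (List Int)) (s : Option (Int × List Int)),
      l.foldl (stepA rem L h M) (toPair s) = toPair (l.foldl (FF L M rem h []) s) := by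
  intro l
  induction l with
  | nil => intro s; rfl
  | cons a t ih => intro s; simp only [List.foldl_cons, stepA_toPair, ih]

-- ===== VERDICT (by name: the statement is the Claim_ definition above) =====
theorem assign_remaining_containers_spec : Claim_equal_assign_remaining_containers := by
  intro rem L h M n _dom _pre
  unfold Spec_assign_remaining_containers
  unfold assign_remaining_containers assign_remaining_containers_alt
  by_cases hrem : rem.isEmpty
  · simp [hrem]
  · simp only [hrem, Bool.false_eq_true, if_false]
    have key : (prodColsA n.toNat rem.length).foldl (stepA rem L h M) (none, none)
        = toPair (dfsB L M n.toNat rem h [] none) := by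
      have h0 : ((none, none) : Option Int × Option (List Int)) = toPair none := rfl
      rw [h0, foldl_toPair, dfsB_eq_foldl]
    rw [key]
    cases hd : dfsB L M n.toNat rem h [] none with
    | none => simp [toPair]
    | some p => simp [toPair]
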